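-- pv_equiv track=rewrite | github.com/ancient0328/CYRUNE-Free-v0.1 | free/v0.1/0/scripts/stage_shipping_readiness.py | normalize_identifier_suffix
-- ===== SOURCE A (Python) =====
-- def normalize_identifier_suffix(label: str) -> str:
--     tokens = [
--         "".join(char for char in chunk.lower() if char.isalnum())
--         for chunk in label.split()
--     ]
--     tokens = [token for token in tokens if token]
--     if not tokens:
--         raise ValueError("product line label cannot derive reverse-DNS suffix")
--     return tokens[-1]
-- ===== SOURCE B (Python) =====
-- def normalize_identifier_suffix(label: str) -> str:
--     suffix = []
--     seen = False
--     for c in reversed(label):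
--         if c.isalnum():
--             suffix.append(c.lower())
--             seen = True
--         elif c.isspace():
--             if seen:
--                 break
--         # any other character is skipped
--     if not seen:
--         raise ValueError("product line label cannot derive reverse-DNS suffix")
--     return "".join(reversed(suffix))
-- ===== Notes on version B (the rewrite author's own statement) =====
-- stated objective: alternative
-- what changed: A splits the label into chunks, cleans every chunk, filters out the empty ones and takes the last; B makes a single right-to-left character scan with early exit, collecting the lowercased alphanumeric characters until the first whitespace after (in scan order) the first alphanumeric character, with no splitting and no intermediate token list.
import Mathlib
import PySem

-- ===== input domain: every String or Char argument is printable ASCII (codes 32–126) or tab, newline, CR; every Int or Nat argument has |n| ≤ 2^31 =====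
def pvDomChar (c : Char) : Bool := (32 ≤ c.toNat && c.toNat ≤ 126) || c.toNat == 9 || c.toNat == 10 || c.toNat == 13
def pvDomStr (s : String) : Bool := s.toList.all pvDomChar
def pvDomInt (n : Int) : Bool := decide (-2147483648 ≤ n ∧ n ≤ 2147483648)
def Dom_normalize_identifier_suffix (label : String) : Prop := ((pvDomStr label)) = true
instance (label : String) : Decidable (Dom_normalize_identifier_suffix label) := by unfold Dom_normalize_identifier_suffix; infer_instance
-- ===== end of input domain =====

-- B replaces A's build-all-tokens-then-take-last pipeline with a single right-to-left
-- character scan with early exit (no splitting, no intermediate token list).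


-- ===== PORT A =====
def normalize_identifier_suffix (label : String) : String :=
  let tokens := (PySem.Chars.split₀ label.toList).map
    (fun chunk => (PySem.Chars.lower chunk).filter PySem.Chars.isalnum)
  let tokens2 := tokens.filter (fun t => !t.isEmpty)
  match tokens2.getLast? with
  | some t => String.ofList t
  | none => ""   -- Python raises ValueError here; excluded by Pre_

-- ===== PORT B =====
-- the for-loop over reversed(label) with its break / continue, state (suffix, seen)
def pvAltGo : List Char → List Char → Bool → List Char × Bool
  | [], suffix, seen => (suffix, seen)
  | c :: rest, suffix, seen =>
    if PySem.Chars.isalnum c then pvAltGo rest (suffix ++ [PySem.Chars.lowerChar c]) true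
    else if PySem.Chars.isspace c then
      (if seen then (suffix, seen) else pvAltGo rest suffix seen)
    else pvAltGo rest suffix seen

def normalize_identifier_suffix_alt (label : String) : String :=
  let r := pvAltGo label.toList.reverse [] false
  if r.2 then String.ofList r.1.reverse else ""   -- Python raises ValueError here; excluded by Pre_

-- ===== PRECONDITION & SPEC =====
-- Pre_: Python A raises ValueError exactly when the label has no alphanumeric character
def Pre_normalize_identifier_suffix (label : String) : Prop :=
  label.toList.any PySem.Chars.isalnum = true
instance (label : String) : Decidable (Pre_normalize_identifier_suffix label) := by
  unfold Pre_normalize_identifier_suffix; infer_instance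

def pvWitness_normalize_identifier_suffix : String := "Stage 3"

def Spec_normalize_identifier_suffix (label : String) (out : String) : Prop := out = normalize_identifier_suffix_alt label
instance (label : String) (out : String) : Decidable (Spec_normalize_identifier_suffix label out) := by unfold Spec_normalize_identifier_suffix; infer_instance

-- ===== CLAIM (what is proved, stated in full; the proofs are below) =====
def Claim_equal_normalize_identifier_suffix : Prop := ∀ (label : String), Dom_normalize_identifier_suffix label → Pre_normalize_identifier_suffix label → Spec_normalize_identifier_suffix label (normalize_identifier_suffix label)

-- ===== LEMMAS AND PROOFS =====

-- the state-transformer view of PySem.Chars.split₀.go: a fold over the characters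
def pvStep (st : List Char × List (List Char)) (c : Char) : List Char × List (List Char) :=
  if PySem.Chars.isspace c then
    (if st.1.isEmpty then ([], st.2) else ([], st.1.reverse :: st.2))
  else (c :: st.1, st.2)

def pvFin (st : List Char × List (List Char)) : List (List Char) :=
  if st.1.isEmpty then st.2.reverse else (st.1.reverse :: st.2).reverse

def pvClean (t : List Char) : List Char :=
  (PySem.Chars.lower t).filter PySem.Chars.isalnum

def pvAval (ws : List (List Char)) : List Char :=
  ((ws.map pvClean).filter (fun t => !t.isEmpty)).getLastD []

def pvP (c : Char) : Bool := !PySem.Chars.isspace c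

-- character-class facts
theorem pv_char_simp (d : Char) : d.toNat = d.val.toNat := rfl

theorem pv_al_not_sp (c : Char) (h : PySem.Chars.isalnum c = true) :
    PySem.Chars.isspace c = false := by
  simp only [PySem.Chars.isalnum, PySem.Chars.isalpha, PySem.Chars.isdigit,
        PySem.Chars.isupper, PySem.Chars.islower, PySem.Chars.isspace,
        Bool.or_eq_true, Bool.and_eq_true, decide_eq_true_eq, Char.le_def,
        UInt32.le_iff_toNat_le, show 'A'.val.toNat = 65 from rfl, show 'Z'.val.toNat = 90 from rfl,
        show 'a'.val.toNat = 97 from rfl, show 'z'.val.toNat = 122 from rfl,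
        show '0'.val.toNat = 48 from rfl, show '9'.val.toNat = 57 from rfl,
        pv_char_simp] at h ⊢
  simp only [Bool.or_eq_false_iff, decide_eq_false_iff_not, Bool.and_eq_false_imp,
        decide_eq_true_eq, not_le]
  omega

theorem pv_al_of_lower_range (d : Char) (h1 : 97 ≤ d.toNat) (h2 : d.toNat ≤ 122) :
    PySem.Chars.isalnum d = true := by
  simp only [PySem.Chars.isalnum, PySem.Chars.isalpha, PySem.Chars.islower,
        Bool.or_eq_true, Bool.and_eq_true, decide_eq_true_eq, Char.le_def,
        UInt32.le_iff_toNat_le, show 'a'.val.toNat = 97 from rfl,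
        show 'z'.val.toNat = 122 from rfl]
  exact Or.inl (Or.inr ⟨h1, h2⟩)

theorem pv_al_lower (c : Char) :
    PySem.Chars.isalnum (PySem.Chars.lowerChar c) = PySem.Chars.isalnum c := by
  simp only [PySem.Chars.lowerChar]
  split_ifs with h
  · have hn : 65 ≤ c.toNat ∧ c.toNat ≤ 90 := by
      simpa only [PySem.Chars.isupper, Bool.and_eq_true, decide_eq_true_eq, Char.le_def,
        UInt32.le_iff_toNat_le, show 'A'.val.toNat = 65 from rfl,
        show 'Z'.val.toNat = 90 from rfl] using h
    have hval : (Char.ofNat (c.toNat + 32)).toNat = c.toNat + 32 := by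
      rw [Char.toNat_ofNat, if_pos (Or.inl (by omega))]
    have h1 : PySem.Chars.isalnum c = true := by
      simp [PySem.Chars.isalnum, PySem.Chars.isalpha, h]
    have h2 : PySem.Chars.isalnum (Char.ofNat (c.toNat + 32)) = true :=
      pv_al_of_lower_range _ (by rw [hval]; omega) (by rw [hval]; omega)
    rw [h1, h2]
  · rfl

theorem pv_comp_al : (PySem.Chars.isalnum ∘ PySem.Chars.lowerChar) = PySem.Chars.isalnum := by
  funext c; exact pv_al_lower c

theorem pv_clean_reverse (l : List Char) :
    pvClean l.reverse = ((l.filter PySem.Chars.isalnum).map PySem.Chars.lowerChar).reverse := by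
  simp [pvClean, PySem.Chars.lower, List.filter_map, pv_comp_al]

-- split₀.go is the fold pvStep finished with pvFin
theorem pv_go_eq_fold (s cur : List Char) (acc : List (List Char)) :
    PySem.Chars.split₀.go s cur acc = pvFin (s.foldl pvStep (cur, acc)) := by
  induction s generalizing cur acc with
  | nil => simp [PySem.Chars.split₀.go, pvFin]
  | cons c rest ih =>
    simp only [PySem.Chars.split₀.go, List.foldl_cons]
    by_cases hs : PySem.Chars.isspace c
    · by_cases hc : cur.isEmpty <;> simp [hs, hc, pvStep, ih]
    · simp [hs, pvStep, ih]

theorem pv_split₀_eq (cs : List Char) :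
    PySem.Chars.split₀ cs = pvFin (cs.foldl pvStep ([], [])) := by
  simpa [PySem.Chars.split₀] using pv_go_eq_fold cs [] []

-- state-level snoc lemmas for the A-side value
theorem pv_fin_eq (cur : List Char) (acc : List (List Char)) :
    pvFin (cur, acc) = acc.reverse ++ (if cur.isEmpty then [] else [cur.reverse]) := by
  cases cur <;> simp [pvFin]

theorem pv_aval_append (ws : List (List Char)) (w : List Char) :
    pvAval (ws ++ [w]) = if (pvClean w).isEmpty then pvAval ws else pvClean w := by
  by_cases h : (pvClean w).isEmpty
  · simp [pvAval, List.filter_append, h]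
  · simp [pvAval, List.filter_append, h]

theorem pv_fin_sp (st : List Char × List (List Char)) (c : Char)
    (hs : PySem.Chars.isspace c = true) : pvFin (pvStep st c) = pvFin st := by
  obtain ⟨cur, acc⟩ := st
  by_cases hc : cur.isEmpty <;> simp [pvStep, pvFin, hs, hc]

theorem pv_aval_other (st : List Char × List (List Char)) (c : Char)
    (hs : PySem.Chars.isspace c = false) (ha : PySem.Chars.isalnum c = false) :
    pvAval (pvFin (pvStep st c)) = pvAval (pvFin st) := by
  obtain ⟨cur, acc⟩ := st
  have hclean : pvClean (cur.reverse ++ [c]) = pvClean cur.reverse := by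
    simp [pvClean, PySem.Chars.lower, pv_al_lower, ha]
  have h1 : pvStep (cur, acc) c = (c :: cur, acc) := by simp [pvStep, hs]
  rw [h1, pv_fin_eq, pv_fin_eq]
  cases cur with
  | nil =>
    have hce : (pvClean [c]).isEmpty = true := by
      simp [pvClean, PySem.Chars.lower, pv_al_lower, ha]
    simp [pv_aval_append, hce]
  | cons d t =>
    simp only [List.isEmpty_cons, Bool.false_eq_true, not_false_eq_true, if_neg,
      List.reverse_cons]
    rw [pv_aval_append, pv_aval_append]
    have h2 : pvClean (t.reverse ++ [d] ++ [c]) = pvClean (t.reverse ++ [d]) := by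
      simpa using hclean
    rw [h2]

theorem pv_aval_al (st : List Char × List (List Char)) (c : Char)
    (ha : PySem.Chars.isalnum c = true) :
    pvAval (pvFin (pvStep st c)) = pvClean st.1.reverse ++ [PySem.Chars.lowerChar c] := by
  obtain ⟨cur, acc⟩ := st
  have hs : PySem.Chars.isspace c = false := pv_al_not_sp c ha
  have hclean : pvClean (cur.reverse ++ [c]) = pvClean cur.reverse ++ [PySem.Chars.lowerChar c] := by
    simp [pvClean, PySem.Chars.lower, pv_al_lower, ha]
  have h1 : pvStep (cur, acc) c = (c :: cur, acc) := by simp [pvStep, hs]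
  rw [h1, pv_fin_eq]
  simp only [List.isEmpty_cons, Bool.false_eq_true, not_false_eq_true, if_neg,
    List.reverse_cons]
  rw [pv_aval_append, hclean]
  have : (pvClean cur.reverse ++ [PySem.Chars.lowerChar c]).isEmpty = false := by
    simp
  rw [if_neg (by simp [this])]

-- trailing-word invariant of the fold state
theorem pv_state_fst (ys : List Char) :
    (ys.foldl pvStep ([], [])).1 = ys.reverse.takeWhile pvP := by
  induction ys using List.reverseRecOn with
  | nil => simp
  | append_singleton ys c ih =>
    rw [List.foldl_append, List.foldl_cons, List.foldl_nil, List.reverse_append]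
    by_cases hs : PySem.Chars.isspace c
    · have hp : pvP c = false := by simp [pvP, hs]
      by_cases hc : (ys.foldl pvStep ([], [])).1.isEmpty <;>
        simp [pvStep, hs, hc, hp]
    · have hp : pvP c = true := by simp [pvP, hs]
      simp [pvStep, hs, hp, ih]

-- B's loop in seen-mode: collects the lowercased alnum chars up to the first whitespace
theorem pv_altGo_seen (rs acc : List Char) :
    pvAltGo rs acc true =
      (acc ++ ((rs.takeWhile pvP).filter PySem.Chars.isalnum).map PySem.Chars.lowerChar, true) := by
  induction rs generalizing acc with
  | nil => simp [pvAltGo]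
  | cons c rest ih =>
    by_cases ha : PySem.Chars.isalnum c
    · have hs : PySem.Chars.isspace c = false := pv_al_not_sp c ha
      have hp : pvP c = true := by simp [pvP, hs]
      simp [pvAltGo, ha, ih, hp]
    · by_cases hs : PySem.Chars.isspace c
      · have hp : pvP c = false := by simp [pvP, hs]
        simp [pvAltGo, ha, hs, hp]
      · have hp : pvP c = true := by simp [pvP, hs]
        simp [pvAltGo, ha, hs, ih, hp]

-- list-level values of the two ports
def pvB (r : List Char) : List Char :=
  let t := pvAltGo r [] false
  if t.2 then t.1.reverse else []

def pvA (cs : List Char) : List Char :=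
  pvAval (pvFin (cs.foldl pvStep ([], [])))

-- the main equivalence, on reversed character lists
theorem pv_main (r : List Char) : pvB r = pvA r.reverse := by
  induction r with
  | nil => simp [pvB, pvAltGo, pvA, pvFin, pvAval]
  | cons c rest ih =>
    by_cases ha : PySem.Chars.isalnum c
    · have hL : pvB (c :: rest) =
          (((rest.takeWhile pvP).filter PySem.Chars.isalnum).map PySem.Chars.lowerChar).reverse
            ++ [PySem.Chars.lowerChar c] := by
        simp [pvB, pvAltGo, ha, pv_altGo_seen]
      have hR : pvA (c :: rest).reverse =
          pvClean ((rest.takeWhile pvP).reverse) ++ [PySem.Chars.lowerChar c] := by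
        rw [List.reverse_cons, pvA, List.foldl_append, List.foldl_cons, List.foldl_nil,
          pv_aval_al _ c ha, pv_state_fst, List.reverse_reverse]
      rw [hL, hR, pv_clean_reverse]
    · by_cases hs : PySem.Chars.isspace c
      · have hL : pvB (c :: rest) = pvB rest := by simp [pvB, pvAltGo, ha, hs]
        have hR : pvA (c :: rest).reverse = pvA rest.reverse := by
          rw [List.reverse_cons, pvA, List.foldl_append, List.foldl_cons, List.foldl_nil,
            pv_fin_sp _ c hs]
          rfl
        rw [hL, hR]; exact ih
      · have hL : pvB (c :: rest) = pvB rest := by simp [pvB, pvAltGo, ha, hs]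
        have hR : pvA (c :: rest).reverse = pvA rest.reverse := by
          rw [List.reverse_cons, pvA, List.foldl_append, List.foldl_cons, List.foldl_nil,
            pv_aval_other _ c (by simpa using hs) (by simpa using ha)]
          rfl
        rw [hL, hR]; exact ih

-- the two ports compute String.ofList of pvA / pvB
theorem pv_portA (label : String) :
    normalize_identifier_suffix label = String.ofList (pvA label.toList) := by
  rw [normalize_identifier_suffix]
  rw [pv_split₀_eq]
  show (match (((pvFin (label.toList.foldl pvStep ([], []))).map pvClean).filter
      (fun t => !t.isEmpty)).getLast? with
    | some t => String.ofList t
    | none => "") = _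
  rcases hl : (((pvFin (label.toList.foldl pvStep ([], []))).map pvClean).filter
      (fun t => !t.isEmpty)).getLast? with _ | t
  · simp only [pvA, pvAval, List.getLastD_eq_getLast?, hl, Option.getD_none]
  · simp only [pvA, pvAval, List.getLastD_eq_getLast?, hl, Option.getD_some]

theorem pv_portB (label : String) :
    normalize_identifier_suffix_alt label = String.ofList (pvB label.toList.reverse) := by
  rw [normalize_identifier_suffix_alt, pvB]
  rcases h : pvAltGo label.toList.reverse [] false with ⟨suf, seen⟩
  cases seen <;> simp

-- ===== VERDICT (by name: the statement is the Claim_ definition above) =====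
theorem normalize_identifier_suffix_spec : Claim_equal_normalize_identifier_suffix := by
  intro label _ _
  unfold Spec_normalize_identifier_suffix
  rw [pv_portA, pv_portB, pv_main, List.reverse_reverse]
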